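-- pv_equiv track=rewrite | github.com/saiteja5421/pytest_locust | Medusa/lib/dscc/data_panorama/consumption/api/volumes_api.py | convert_dict_keys_to_kebab_case
-- ===== SOURCE A (Python) =====
-- def convert_dict_keys_to_kebab_case(params):
--     """This function converts keys of the dictionary from Pascal/Camel case to kebab case
--
--     Returns:
--         params:  dictionary (keys with kebab case)
--     """
--
--     def to_kebab_case(string):
--         # Convert the first letter of the string to lowercase
--         kebab_string = string[0].lower() + string[1:]
--         # Replace any uppercase letters with a hyphen and lowercase letter
--         kebab_string = "".join(["-" + i.lower() if i.isupper() else i for i in kebab_string])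
--         return kebab_string
--
--     kebab_params = {}
--     for key, value in params.items():
--         kebab_key = to_kebab_case(key)
--         kebab_params[kebab_key] = value
--     return kebab_params
-- ===== SOURCE B (Python) =====
-- def convert_dict_keys_to_kebab_case(params):
--     """Kebab-case the dict keys by splitting each key into words at interior
--     uppercase letters and joining the lowercased words with hyphens, instead of
--     replacing characters one by one."""
--     def to_kebab(key):
--         words = []
--         cur = ""
--         for c in key:
--             if c.isupper() and cur != "":
--                 words.append(cur)
--                 cur = ""
--             cur += c.lower()
--         words.append(cur)
--         return "-".join(words)
--
--     return {to_kebab(key): value for key, value in params.items()}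
-- ===== Notes on version B (the rewrite author's own statement) =====
-- stated objective: alternative
-- what changed: Instead of mapping each character to a replacement string ('-'+lower for uppercase) and concatenating, B runs a word-segmentation state machine: it splits the key into words at interior uppercase letters, lowercases the words, and joins them with '-'; the dict is rebuilt by a comprehension.
import Mathlib
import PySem

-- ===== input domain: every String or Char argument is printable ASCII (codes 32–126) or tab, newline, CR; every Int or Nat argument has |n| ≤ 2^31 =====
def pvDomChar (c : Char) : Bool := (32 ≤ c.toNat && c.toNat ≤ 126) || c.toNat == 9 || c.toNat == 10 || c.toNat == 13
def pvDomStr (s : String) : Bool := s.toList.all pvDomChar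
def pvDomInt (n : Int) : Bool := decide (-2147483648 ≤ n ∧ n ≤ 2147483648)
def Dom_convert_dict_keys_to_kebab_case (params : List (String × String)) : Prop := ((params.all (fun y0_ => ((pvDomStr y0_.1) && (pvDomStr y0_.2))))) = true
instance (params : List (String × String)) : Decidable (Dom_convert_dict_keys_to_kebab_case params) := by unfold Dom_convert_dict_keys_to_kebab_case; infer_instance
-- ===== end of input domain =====

-- B replaces A's per-character replacement (each uppercase char becomes '-'+lower, then concatenate)
-- by a word-segmentation state machine: split the key into words at interior uppercase letters,
-- lowercase the words and join them with '-' (objective: alternative, same cost).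

-- ===== PORT A =====
-- to_kebab_case: string[0].lower() + string[1:], then the per-char comprehension joined by "".join
def pvToKebabCase (s : String) : String :=
  match s.toList with
  | [] => ""   -- string[0] raises IndexError on an empty key; Pre_ excludes this
  | c :: rest =>
    let kebab_string := PySem.Chars.lower [c] ++ rest
    String.ofList (kebab_string.flatMap (fun i =>
      if PySem.Chars.isupper i then '-' :: PySem.Chars.lower [i] else [i]))

def convert_dict_keys_to_kebab_case (params : List (String × String)) : List (String × String) :=
  (params.foldl (fun kebab_params kv => kebab_params.insert (pvToKebabCase kv.1) kv.2)
    (PySem.Dict.empty : PySem.Dict String String)).items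

-- ===== PORT B =====
-- the loop body of to_kebab: if c.isupper() and cur != "": words.append(cur); cur = "";  cur += c.lower()
def pvKebabStep (st : List (List Char) × List Char) (c : Char) : List (List Char) × List Char :=
  let st := if PySem.Chars.isupper c && st.2 != [] then (st.1 ++ [st.2], ([] : List Char)) else st
  (st.1, st.2 ++ PySem.Chars.lower [c])

-- to_kebab: the fold over the key's characters, words.append(cur) after the loop, then "-".join(words)
def pvToKebabAlt (s : String) : String :=
  let st := s.toList.foldl pvKebabStep ([], [])
  String.ofList (List.intercalate ['-'] (st.1 ++ [st.2]))

def convert_dict_keys_to_kebab_case_alt (params : List (String × String)) : List (String × String) :=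
  (params.foldl (fun kebab kv => kebab.insert (pvToKebabAlt kv.1) kv.2)
    (PySem.Dict.empty : PySem.Dict String String)).items

-- ===== PRECONDITION & SPEC =====
-- Pre_ excludes params containing an empty key, on which A raises IndexError at string[0].
def Pre_convert_dict_keys_to_kebab_case (params : List (String × String)) : Prop :=
  ∀ p ∈ params, p.1 ≠ ""
instance (params : List (String × String)) : Decidable (Pre_convert_dict_keys_to_kebab_case params) := by
  unfold Pre_convert_dict_keys_to_kebab_case; infer_instance

def pvWitness_convert_dict_keys_to_kebab_case : (List (String × String)) :=
  [("MaxIoSize", "10"), ("filterBy", "volumeName"), ("offset", "0")]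

def Spec_convert_dict_keys_to_kebab_case (params : List (String × String)) (out : List (String × String)) : Prop := out = convert_dict_keys_to_kebab_case_alt params
instance (params : List (String × String)) (out : List (String × String)) : Decidable (Spec_convert_dict_keys_to_kebab_case params out) := by unfold Spec_convert_dict_keys_to_kebab_case; infer_instance

-- ===== CLAIM (what is proved, stated in full; the proofs are below) =====
def Claim_equal_convert_dict_keys_to_kebab_case : Prop := ∀ (params : List (String × String)), Dom_convert_dict_keys_to_kebab_case params → Pre_convert_dict_keys_to_kebab_case params → Spec_convert_dict_keys_to_kebab_case params (convert_dict_keys_to_kebab_case params)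


-- ===== LEMMAS AND PROOFS =====

-- A's per-char replacement, as a function of the tail
def pvRepl (cs : List Char) : List Char :=
  cs.flatMap (fun i => if PySem.Chars.isupper i then '-' :: PySem.Chars.lower [i] else [i])


theorem pvUpperBounds (ch : Char) (h : PySem.Chars.isupper ch = true) :
    65 ≤ ch.toNat ∧ ch.toNat ≤ 90 := by
  simpa only [PySem.Chars.isupper, Bool.and_eq_true, decide_eq_true_eq, Char.le_def] using h

theorem pvOfNat_not_upper (k : Nat) (h1 : 65 ≤ k) (h2 : k ≤ 90) :
    PySem.Chars.isupper (Char.ofNat (k + 32)) = false := by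
  interval_cases k <;> decide

theorem pvIsupper_lowerChar (c : Char) :
    PySem.Chars.isupper (PySem.Chars.lowerChar c) = false := by
  unfold PySem.Chars.lowerChar
  by_cases h : PySem.Chars.isupper c = true
  · obtain ⟨hb1, hb2⟩ := pvUpperBounds c h
    simp only [h, if_true]
    exact pvOfNat_not_upper c.toNat hb1 hb2
  · simp [h]

theorem pvLowerChar_id (c : Char) (h : PySem.Chars.isupper c = false) :
    PySem.Chars.lowerChar c = c := by
  simp [PySem.Chars.lowerChar, h]

theorem pvInterCC (a b : List Char) (t : List (List Char)) :
    List.intercalate ['-'] (a :: b :: t) = a ++ '-' :: List.intercalate ['-'] (b :: t) := by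
  simp [List.intercalate, List.intersperse]

theorem pvInter_concat (xs : List (List Char)) (y : List Char) (hxs : xs ≠ []) :
    List.intercalate ['-'] (xs ++ [y]) = List.intercalate ['-'] xs ++ '-' :: y := by
  induction xs with
  | nil => exact absurd rfl hxs
  | cons a t ih =>
    cases t with
    | nil => simp [List.intercalate]
    | cons b t' =>
      have ih' := ih (by simp)
      simp only [List.cons_append] at ih' ⊢
      rw [pvInterCC, ih', pvInterCC]
      simp

theorem pvInter_last_append (xs : List (List Char)) (y z : List Char) :
    List.intercalate ['-'] (xs ++ [y ++ z]) = List.intercalate ['-'] (xs ++ [y]) ++ z := by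
  induction xs with
  | nil => simp [List.intercalate]
  | cons a t ih =>
    cases t with
    | nil => simp [List.intercalate]
    | cons b t' =>
      simp only [List.cons_append] at ih ⊢
      rw [pvInterCC, ih, pvInterCC]
      simp

-- loop invariant of B's fold: a nonempty current word stays nonempty, and the joined
-- words so far extend by exactly A's replacement of the processed characters
theorem pvAltInv (p : List Char) : ∀ (ws : List (List Char)) (cur : List Char), cur ≠ [] →
    (p.foldl pvKebabStep (ws, cur)).2 ≠ [] ∧
    List.intercalate ['-'] ((p.foldl pvKebabStep (ws, cur)).1 ++ [(p.foldl pvKebabStep (ws, cur)).2])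
      = List.intercalate ['-'] (ws ++ [cur]) ++ pvRepl p := by
  induction p with
  | nil => intro ws cur h; exact ⟨h, by simp [pvRepl]⟩
  | cons c p ih =>
    intro ws cur h
    have hne : (cur != []) = true := by simpa using h
    by_cases hu : PySem.Chars.isupper c = true
    · have hstep : pvKebabStep (ws, cur) c = (ws ++ [cur], [PySem.Chars.lowerChar c]) := by
        simp [pvKebabStep, hu, hne, PySem.Chars.lower]
      simp only [List.foldl_cons, hstep]
      obtain ⟨h1, h2⟩ := ih (ws ++ [cur]) [PySem.Chars.lowerChar c] (by simp)
      refine ⟨h1, ?_⟩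
      rw [h2, pvInter_concat (ws ++ [cur]) _ (by simp)]
      simp [pvRepl, hu, PySem.Chars.lower]
    · have hu' : PySem.Chars.isupper c = false := by simpa using hu
      have hstep : pvKebabStep (ws, cur) c = (ws, cur ++ [c]) := by
        simp [pvKebabStep, hu', PySem.Chars.lower, pvLowerChar_id c hu']
      simp only [List.foldl_cons, hstep]
      obtain ⟨h1, h2⟩ := ih ws (cur ++ [c]) (by simp)
      refine ⟨h1, ?_⟩
      rw [h2, pvInter_last_append]
      simp [pvRepl, hu']

-- the two key converters agree on every non-empty key
theorem pvKebab_eq (s : String) (h : s ≠ "") :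
    pvToKebabCase s = pvToKebabAlt s := by
  cases hs : s.toList with
  | nil => exact absurd (by simpa using hs) h
  | cons c rest =>
    unfold pvToKebabCase pvToKebabAlt
    rw [hs]
    have hfirst : pvKebabStep ([], []) c = ([], [PySem.Chars.lowerChar c]) := by
      simp [pvKebabStep, PySem.Chars.lower]
    obtain ⟨_, h2⟩ := pvAltInv rest [] [PySem.Chars.lowerChar c] (by simp)
    simp only [List.foldl_cons, hfirst]
    rw [h2]
    simp [pvRepl, PySem.Chars.lower, pvIsupper_lowerChar c, List.intercalate]

theorem pvFold_eq (params : List (String × String))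
    (hpre : ∀ p ∈ params, p.1 ≠ "") :
    convert_dict_keys_to_kebab_case params = convert_dict_keys_to_kebab_case_alt params := by
  unfold convert_dict_keys_to_kebab_case convert_dict_keys_to_kebab_case_alt
  congr 1
  apply PySem.List.foldl_congr_mem
  intro d kv hmem
  rw [pvKebab_eq kv.1 (hpre kv hmem)]

-- ===== VERDICT (by name: the statement is the Claim_ definition above) =====
theorem convert_dict_keys_to_kebab_case_spec : Claim_equal_convert_dict_keys_to_kebab_case := by
  intro params _ hpre
  unfold Spec_convert_dict_keys_to_kebab_case
  exact pvFold_eq params hpre
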